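-- pv_equiv track=rewrite | github.com/bzerath/Miscellaneous | Gwenaelle/Qwirkle/qwirkle_2.py | check_selection_is_ok
-- ===== SOURCE A (Python) =====
-- def check_selection_is_ok(hand: list, selection: list) -> bool:
--     """ Vérifie que une seule forme ou bien une seule couleur a été choisie pour être jouée
--
--     :param hand: liste de tuples (forme, couleur)
--     :param selection: liste des index de cartes choisies
--     :return: booléen
--     """
--     couleurs = set()
--     formes = set()
--     for numero in selection:
--         formes.add(hand[numero][0])
--         couleurs.add(hand[numero][1])
--     if len(formes) > 1 and len(couleurs) > 1:
--         return False
--     else: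
--         return True
-- ===== SOURCE B (Python) =====
-- def check_selection_is_ok(hand: list, selection: list) -> bool:
--     same_shape = True
--     same_color = True
--     ref = None
--     for numero in selection:
--         card = hand[numero]
--         if ref is None:
--             ref = card
--         else:
--             if card[0] != ref[0]:
--                 same_shape = False
--             if card[1] != ref[1]:
--                 same_color = False
--     return same_shape or same_color
-- ===== Notes on version B (the rewrite author's own statement) =====
-- stated objective: simpler
-- what changed: Instead of accumulating two sets of shapes/colors and comparing their sizes, B keeps the first selected card as a reference and maintains two boolean flags that drop to False when a later card's shape/color differs.
import Mathlib
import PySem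

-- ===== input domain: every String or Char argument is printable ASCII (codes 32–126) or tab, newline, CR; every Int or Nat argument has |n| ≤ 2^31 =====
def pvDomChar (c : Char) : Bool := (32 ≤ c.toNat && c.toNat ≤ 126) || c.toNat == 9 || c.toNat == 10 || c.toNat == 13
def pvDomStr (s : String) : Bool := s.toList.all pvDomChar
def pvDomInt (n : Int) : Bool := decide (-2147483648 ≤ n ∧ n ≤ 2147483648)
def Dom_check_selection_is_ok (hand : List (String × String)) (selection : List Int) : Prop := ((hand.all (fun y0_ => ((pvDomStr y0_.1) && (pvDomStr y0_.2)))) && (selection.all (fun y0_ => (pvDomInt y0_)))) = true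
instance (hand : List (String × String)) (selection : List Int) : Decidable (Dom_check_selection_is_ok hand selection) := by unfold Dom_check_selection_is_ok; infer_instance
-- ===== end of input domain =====

-- B replaces A's two accumulated sets (compared by size) with two boolean flags checked
-- against the first selected card: simpler, same O(n) cost. Equal return value on Pre_.

-- ===== PORT A =====
-- A: accumulate the set of shapes and the set of colors over the selection,
-- return False iff both have more than one element.
def check_selection_is_ok (hand : List (String × String)) (selection : List Int) : Bool :=
  let st := selection.foldl
    (fun (acc : PySem.Set String × PySem.Set String) numero =>
      (PySem.Set.add acc.1 (PySem.List.pyGetD hand numero ("", "")).1,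
       PySem.Set.add acc.2 (PySem.List.pyGetD hand numero ("", "")).2))
    (PySem.Set.empty, PySem.Set.empty)
  if 1 < st.1.length && 1 < st.2.length then false else true

-- ===== PORT B =====
-- B: remember the first selected card; two flags record whether every later card
-- shares its shape resp. its color.
def check_selection_is_ok_alt (hand : List (String × String)) (selection : List Int) : Bool :=
  let st := selection.foldl
    (fun (acc : Bool × Bool × Option (String × String)) numero =>
      let card := PySem.List.pyGetD hand numero ("", "")
      match acc with
      | (s, c, none) => (s, c, some card)
      | (s, c, some r) =>
        ((if card.1 ≠ r.1 then false else s),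
         (if card.2 ≠ r.2 then false else c), some r))
    (true, true, none)
  st.1 || st.2.1

-- ===== PRECONDITION & SPEC =====
-- Pre_: every selected index is in range for hand (otherwise Python A raises IndexError).
def Pre_check_selection_is_ok (hand : List (String × String)) (selection : List Int) : Prop :=
  ∀ i ∈ selection, PySem.Raise.InRange hand.length i
instance (hand : List (String × String)) (selection : List Int) : Decidable (Pre_check_selection_is_ok hand selection) := by unfold Pre_check_selection_is_ok; infer_instance

def pvWitness_check_selection_is_ok : (List (String × String)) × List Int :=
  ([("circle", "red"), ("square", "red")], [0, 1, -1])

def Spec_check_selection_is_ok (hand : List (String × String)) (selection : List Int) (out : Bool) : Prop := out = check_selection_is_ok_alt hand selection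
instance (hand : List (String × String)) (selection : List Int) (out : Bool) : Decidable (Spec_check_selection_is_ok hand selection out) := by unfold Spec_check_selection_is_ok; infer_instance

-- ===== CLAIM (what is proved, stated in full; the proofs are below) =====
def Claim_equal_check_selection_is_ok : Prop := ∀ (hand : List (String × String)) (selection : List Int), Dom_check_selection_is_ok hand selection → Pre_check_selection_is_ok hand selection → Spec_check_selection_is_ok hand selection (check_selection_is_ok hand selection)

-- ===== LEMMAS AND PROOFS =====

-- A's pair-of-sets fold splits into two independent folds.
theorem pv_afold (hand : List (String × String)) (sel : List Int) :
    ∀ (F C : PySem.Set String),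
    sel.foldl
      (fun (acc : PySem.Set String × PySem.Set String) numero =>
        (PySem.Set.add acc.1 (PySem.List.pyGetD hand numero ("", "")).1,
         PySem.Set.add acc.2 (PySem.List.pyGetD hand numero ("", "")).2)) (F, C)
    = (sel.foldl (fun s n => PySem.Set.add s (PySem.List.pyGetD hand n ("", "")).1) F,
       sel.foldl (fun s n => PySem.Set.add s (PySem.List.pyGetD hand n ("", "")).2) C) := by
  induction sel with
  | nil => intro F C; rfl
  | cons n ns ih => intro F C; simp [List.foldl_cons, ih]

-- B's fold, once a reference card is set, just conjoins per-card comparisons.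
theorem pv_bfold (hand : List (String × String)) (sel : List Int) :
    ∀ (s c : Bool) (r : String × String),
    sel.foldl
      (fun (acc : Bool × Bool × Option (String × String)) numero =>
        match acc with
        | (s, c, none) => (s, c, some (PySem.List.pyGetD hand numero ("", "")))
        | (s, c, some r) =>
          ((if (PySem.List.pyGetD hand numero ("", "")).1 ≠ r.1 then false else s),
           (if (PySem.List.pyGetD hand numero ("", "")).2 ≠ r.2 then false else c), some r)) (s, c, some r)
    = (s && sel.all (fun n => (PySem.List.pyGetD hand n ("", "")).1 == r.1),
       c && sel.all (fun n => (PySem.List.pyGetD hand n ("", "")).2 == r.2), some r) := by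
  induction sel with
  | nil => intro s c r; simp
  | cons n ns ih =>
    intro s c r
    simp only [List.foldl_cons, List.all_cons, ih]
    by_cases h1 : (PySem.List.pyGetD hand n ("", "")).1 = r.1 <;>
      by_cases h2 : (PySem.List.pyGetD hand n ("", "")).2 = r.2 <;>
      simp [h1, h2]

-- Nodup is preserved by a fold of Set.add.
theorem pv_nodup_fold {α : Type} [BEq α] [LawfulBEq α] (f : Int → α) (sel : List Int) :
    ∀ (S : PySem.Set α), S.Nodup →
      (sel.foldl (fun s n => PySem.Set.add s (f n)) S).Nodup := by
  induction sel with
  | nil => intro S h; exact h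
  | cons n ns ih => intro S h; simp only [List.foldl_cons]; exact ih _ (PySem.Set.nodup_add _ _ h)

-- A Nodup list containing a, all of whose members equal a, has length <= 1 (and conversely).
theorem pv_len_le_one {α : Type} (S : List α) (hnd : S.Nodup) (a : α) (ha : a ∈ S) :
    S.length ≤ 1 ↔ ∀ x ∈ S, x = a := by
  constructor
  · intro hlen x hx
    match S, hlen with
    | [x0], _ =>
      simp only [List.mem_singleton] at ha hx; rw [hx, ha]
  · intro hall
    match S with
    | [] => simp
    | [x0] => simp
    | x0 :: x1 :: t =>
      exfalso
      have h0 := hall x0 (by simp)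
      have h1 := hall x1 (by simp)
      have := (List.nodup_cons.mp hnd).1
      simp [h0, h1] at this

-- The accumulated set is a singleton iff every later element equals the first one.
theorem pv_core (f : Int → String) (n : Int) (ns : List Int) :
    (ns.foldl (fun s m => PySem.Set.add s (f m)) (PySem.Set.add PySem.Set.empty (f n))).length ≤ 1
      ↔ (ns.all (fun m => f m == f n)) = true := by
  have mem : ∀ x, x ∈ ns.foldl (fun s m => PySem.Set.add s (f m)) (PySem.Set.add PySem.Set.empty (f n))
      ↔ x ∈ PySem.Set.add PySem.Set.empty (f n) ∨ ∃ b ∈ ns, x = f b :=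
    fun x => PySem.Set.mem_foldl_add ns f _ x
  have nd : (ns.foldl (fun s m => PySem.Set.add s (f m)) (PySem.Set.add PySem.Set.empty (f n))).Nodup :=
    pv_nodup_fold f ns _ (PySem.Set.nodup_add _ _ (by simp [PySem.Set.empty]))
  have hin : f n ∈ ns.foldl (fun s m => PySem.Set.add s (f m)) (PySem.Set.add PySem.Set.empty (f n)) :=
    (mem _).mpr (Or.inl (by simp [PySem.Set.empty]))
  rw [pv_len_le_one _ nd _ hin, List.all_eq_true]
  constructor
  · intro h b hb
    simpa using h _ ((mem _).mpr (Or.inr ⟨b, hb, rfl⟩))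
  · intro h x hx
    rcases (mem x).mp hx with h' | ⟨b, hb, rfl⟩
    · simpa [PySem.Set.mem_add, PySem.Set.empty] using h'
    · simpa using h b hb

-- Boolean bridge between A's size test and B's flags.
theorem pv_bool (x y : Nat) (p q : Bool) (hx : x ≤ 1 ↔ p = true) (hy : y ≤ 1 ↔ q = true) :
    (if (decide (1 < x) && decide (1 < y)) = true then false else true) = (p || q) := by
  by_cases h1 : 1 < x <;> by_cases h2 : 1 < y <;> cases p <;> cases q <;> simp_all <;> omega

-- ===== VERDICT (by name: the statement is the Claim_ definition above) =====
theorem check_selection_is_ok_spec : Claim_equal_check_selection_is_ok := by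
  intro hand selection _ _
  unfold Spec_check_selection_is_ok check_selection_is_ok check_selection_is_ok_alt
  cases selection with
  | nil => rfl
  | cons n ns =>
    simp only [List.foldl_cons]
    simp only [pv_afold, pv_bfold]
    exact pv_bool _ _ _ _
      (pv_core (fun i => (PySem.List.pyGetD hand i ("", "")).1) n ns)
      (pv_core (fun i => (PySem.List.pyGetD hand i ("", "")).2) n ns)
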